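-- pv_equiv track=rewrite | github.com/iamtapendu/Typing-Machine | UI/StatisticTab.py | findNxtThresold
-- ===== SOURCE A (Python) =====
-- def findNxtThresold(score):
--
--     a, b = 10, 20
--     if (score < a):
--         return 0,a
--     elif (score < b):
--         return a,b
--     else:
--         while (score >= b):
--             a, b = b, a + b
--
--     return a,b
-- ===== SOURCE B (Python) =====
-- def findNxtThresold(score):
--     thresholds = [0, 10, 20]
--     while thresholds[-1] <= score:
--         thresholds.append(thresholds[-1] + thresholds[-2])
--     for i in range(len(thresholds) - 1):
--         if score < thresholds[i + 1]:
--             return thresholds[i], thresholds[i + 1]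
-- ===== Notes on version B (the rewrite author's own statement) =====
-- stated objective: alternative
-- what changed: B builds an explicit Fibonacci threshold table seeded with [0,10,20] in one pass and then scans consecutive pairs for the interval, replacing A's early-return guards fused with an in-place (a,b) stepping loop.
import Mathlib
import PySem

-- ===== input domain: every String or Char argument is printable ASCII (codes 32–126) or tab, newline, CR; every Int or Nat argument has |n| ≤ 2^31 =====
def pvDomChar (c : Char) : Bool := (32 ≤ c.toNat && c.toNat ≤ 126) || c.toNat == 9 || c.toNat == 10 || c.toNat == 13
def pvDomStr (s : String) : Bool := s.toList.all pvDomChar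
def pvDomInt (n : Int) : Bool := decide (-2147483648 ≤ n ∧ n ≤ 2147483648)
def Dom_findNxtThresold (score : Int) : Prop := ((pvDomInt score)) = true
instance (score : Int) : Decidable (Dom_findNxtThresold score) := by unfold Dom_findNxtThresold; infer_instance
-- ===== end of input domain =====

-- B replaces A's early-return guards plus fused while-loop by an explicit Fibonacci
-- threshold table built once and then scanned for the interval (objective: alternative).

-- ===== PORT A =====
-- A's while loop; the proof arguments only establish termination (b grows each step).
def findNxtThresoldLoop (score a b : Int) (ha : 0 < a) (hab : a < b) : Int × Int :=
  if h : score ≥ b then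
    findNxtThresoldLoop score b (a + b) (ha.trans hab) (by omega)
  else
    (a, b)
termination_by (score + 1 - b).toNat
decreasing_by simp_wf; omega

def findNxtThresold (score : Int) : Int × Int :=
  if score < 10 then (0, 10)
  else if score < 20 then (10, 20)
  else findNxtThresoldLoop score 10 20 (by norm_num) (by norm_num)

-- ===== PORT B =====
-- the elements appended to the initial table [0, 10, 20] while the last one is ≤ score
def growThresholds (score a b : Int) (ha : 0 < a) (hab : a < b) : List Int :=
  if h : b ≤ score then
    (a + b) :: growThresholds score b (a + b) (ha.trans hab) (by omega)
  else
    []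
termination_by (score + 1 - b).toNat
decreasing_by simp_wf; omega

-- scan consecutive pairs for the first upper bound above score ((0,0) is unreachable)
def scanThresholds (score : Int) : List Int → Int × Int
  | x :: y :: rest => if score < y then (x, y) else scanThresholds score (y :: rest)
  | _ => (0, 0)

def findNxtThresold_alt (score : Int) : Int × Int :=
  scanThresholds score (0 :: 10 :: 20 :: growThresholds score 10 20 (by norm_num) (by norm_num))

-- ===== PRECONDITION & SPEC =====
def Spec_findNxtThresold (score : Int) (out : Int × Int) : Prop := out = findNxtThresold_alt score
instance (score : Int) (out : Int × Int) : Decidable (Spec_findNxtThresold score out) := by unfold Spec_findNxtThresold; infer_instance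

-- ===== CLAIM (what is proved, stated in full; the proofs are below) =====
def Claim_equal_findNxtThresold : Prop := ∀ (score : Int), Dom_findNxtThresold score → Spec_findNxtThresold score (findNxtThresold score)

-- ===== LEMMAS AND PROOFS =====

-- scanning the table segment starting at (a, b) equals running A's loop from (a, b)
theorem scan_grow_eq_loop (score : Int) :
    ∀ (n : Nat) (a b : Int) (ha : 0 < a) (hab : a < b), (score + 1 - b).toNat < n →
      scanThresholds score (a :: b :: growThresholds score a b ha hab) =
        findNxtThresoldLoop score a b ha hab := by
  intro n
  induction n with
  | zero => intro a b ha hab h; omega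
  | succ n ih =>
    intro a b ha hab hn
    by_cases hb : b ≤ score
    · rw [growThresholds.eq_def]
      simp only [dif_pos hb]
      rw [scanThresholds.eq_def]
      simp only [if_neg (not_lt.mpr hb)]
      rw [findNxtThresoldLoop.eq_def]
      simp only [dif_pos (show score ≥ b from hb)]
      exact ih b (a + b) (ha.trans hab) (by omega) (by omega)
    · rw [growThresholds.eq_def]
      simp only [dif_neg hb]
      rw [scanThresholds.eq_def]
      simp only [if_pos (not_le.mp hb)]
      rw [findNxtThresoldLoop.eq_def]
      simp only [dif_neg (show ¬ score ≥ b from hb)]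

-- ===== VERDICT (by name: the statement is the Claim_ definition above) =====
theorem findNxtThresold_spec : Claim_equal_findNxtThresold := by
  intro score _
  unfold Spec_findNxtThresold findNxtThresold findNxtThresold_alt
  by_cases h1 : score < 10
  · rw [growThresholds.eq_def]
    simp [scanThresholds, h1]
  · by_cases h2 : score < 20
    · rw [growThresholds.eq_def]
      simp [scanThresholds, h1, h2]
    · rw [if_neg h1, if_neg h2]
      rw [growThresholds.eq_def]
      simp only [dif_pos (show (20 : Int) ≤ score from not_lt.mp h2)]
      rw [scanThresholds.eq_def]
      simp only [if_neg h1]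
      rw [scanThresholds.eq_def]
      simp only [if_neg h2]
      simp only [show (10 : Int) + 20 = 30 from by norm_num]
      rw [scan_grow_eq_loop score ((score - 29).toNat + 1) 20 30 (by norm_num) (by norm_num) (by omega)]
      rw [findNxtThresoldLoop.eq_def]
      simp only [dif_pos (show score ≥ 20 from not_lt.mp h2)]
      norm_num
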